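-- pv_equiv track=rewrite | github.com/meelgroup/barbarik | interfaces/weightcount/WeightCount.py | getCNF
-- ===== SOURCE A (Python) =====
-- def pushVar(variable, cnfClauses):
--     cnfLen = len(cnfClauses)
--     for i in range(cnfLen):
--         cnfClauses[i].append(variable)
--     return cnfClauses
--
-- def getCNF(variable, binStr, sign, origTotalVars):
--     cnfClauses = []
--     binLen = len(binStr)
--     cnfClauses.append([binLen + 1 + origTotalVars])
--     for i in range(binLen):
--         newVar = binLen - i + origTotalVars
--         if sign == False:
--             newVar = -1 * (binLen - i + origTotalVars)
--         if binStr[binLen - i - 1] == "0":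
--             cnfClauses.append([newVar])
--         else:
--             cnfClauses = pushVar(newVar, cnfClauses)
--     pushVar(variable, cnfClauses)
--     return cnfClauses
-- ===== SOURCE B (Python) =====
-- def getCNF(variable, binStr, sign, origTotalVars):
--     n = len(binStr)
--     s = 1 if sign else -1
--     ones = []          # vars of '1'-bits seen so far, in scan order
--     zeroClauses = []
--     for j in range(n):
--         v = s * (j + 1 + origTotalVars)
--         if binStr[j] == "0":
--             zeroClauses.append([v] + ones[::-1] + [variable])
--         else:
--             ones.append(v)
--     return [[n + 1 + origTotalVars] + ones[::-1] + [variable]] + zeroClauses[::-1]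
-- ===== Notes on version B (the rewrite author's own statement) =====
-- stated objective: faster
-- what changed: A walks the bit string backwards and, at every '1' bit, rescans and appends to ALL clauses built so far (pushVar), plus a final pushVar pass over every clause; B makes one forward pass that accumulates the '1'-bit variables once and assembles each output clause exactly once, with no repeated passes over previously built clauses.
import Mathlib
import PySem

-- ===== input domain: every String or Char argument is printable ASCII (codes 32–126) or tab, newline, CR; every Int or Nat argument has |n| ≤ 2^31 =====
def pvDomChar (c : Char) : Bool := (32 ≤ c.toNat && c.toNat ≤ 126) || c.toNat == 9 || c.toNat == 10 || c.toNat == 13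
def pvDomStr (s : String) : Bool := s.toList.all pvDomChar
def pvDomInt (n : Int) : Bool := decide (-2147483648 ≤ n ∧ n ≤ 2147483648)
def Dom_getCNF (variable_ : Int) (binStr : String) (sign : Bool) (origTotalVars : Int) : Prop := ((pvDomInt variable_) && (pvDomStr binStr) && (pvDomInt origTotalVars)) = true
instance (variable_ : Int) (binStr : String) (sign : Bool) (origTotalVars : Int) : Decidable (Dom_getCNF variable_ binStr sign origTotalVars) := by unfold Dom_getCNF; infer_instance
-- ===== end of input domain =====

-- B replaces A's repeated pushVar scans over all existing clauses by one forward pass that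
-- accumulates the '1'-bit variables and assembles each clause exactly once (measured faster
-- by a constant factor; same return value — neither implementation mutates its arguments).

-- ===== PORT A =====
def pushVar (v : Int) (cnfClauses : List (List Int)) : List (List Int) :=
  cnfClauses.map (fun c => c ++ [v])

def getCNF (variable_ : Int) (binStr : String) (sign : Bool) (origTotalVars : Int) : List (List Int) :=
  let chars := binStr.toList
  let binLen : Int := (chars.length : Int)
  let cnf0 : List (List Int) := [[binLen + 1 + origTotalVars]]
  let cnf := (List.range chars.length).foldl (fun cnfClauses (i : Nat) =>
      let newVar : Int := binLen - (i : Int) + origTotalVars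
      let newVar : Int := if sign = false then (-1) * (binLen - (i : Int) + origTotalVars) else newVar
      if chars.getD (chars.length - i - 1) ' ' = '0' then
        cnfClauses ++ [[newVar]]
      else pushVar newVar cnfClauses) cnf0
  pushVar variable_ cnf

-- ===== PORT B =====
def getCNF_alt (variable_ : Int) (binStr : String) (sign : Bool) (origTotalVars : Int) : List (List Int) :=
  let chars := binStr.toList
  let n : Int := (chars.length : Int)
  let s : Int := if sign then 1 else -1
  let st := (List.range chars.length).foldl (fun (st : List Int × List (List Int)) (j : Nat) =>
      let v : Int := s * ((j : Int) + 1 + origTotalVars)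
      if chars.getD j ' ' = '0' then (st.1, st.2 ++ [v :: st.1.reverse ++ [variable_]])
      else (st.1 ++ [v], st.2)) ([], [])
  ((n + 1 + origTotalVars) :: st.1.reverse ++ [variable_]) :: st.2.reverse

-- ===== PRECONDITION & SPEC =====
def Spec_getCNF (variable_ : Int) (binStr : String) (sign : Bool) (origTotalVars : Int) (out : List (List Int)) : Prop := out = getCNF_alt variable_ binStr sign origTotalVars
instance (variable_ : Int) (binStr : String) (sign : Bool) (origTotalVars : Int) (out : List (List Int)) : Decidable (Spec_getCNF variable_ binStr sign origTotalVars out) := by unfold Spec_getCNF; infer_instance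

-- ===== CLAIM (what is proved, stated in full; the proofs are below) =====
def Claim_equal_getCNF : Prop := ∀ (variable_ : Int) (binStr : String) (sign : Bool) (origTotalVars : Int), Dom_getCNF variable_ binStr sign origTotalVars → Spec_getCNF variable_ binStr sign origTotalVars (getCNF variable_ binStr sign origTotalVars)

-- ===== LEMMAS AND PROOFS =====

-- A's loop body viewed as a step on (value, char) pairs
def aStep (cnf : List (List Int)) (p : Int × Char) : List (List Int) :=
  if p.2 = '0' then cnf ++ [[p.1]] else pushVar p.1 cnf

-- B's loop body viewed the same way
def bStep (var : Int) (st : List Int × List (List Int)) (p : Int × Char) : List Int × List (List Int) :=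
  if p.2 = '0' then (st.1, st.2 ++ [p.1 :: st.1.reverse ++ [var]]) else (st.1 ++ [p.1], st.2)

-- variables of the non-'0' pairs, in list order
def onesOf : List (Int × Char) → List Int
  | [] => []
  | (w, c) :: rest => if c = '0' then onesOf rest else w :: onesOf rest

-- A-shape clauses of the '0' pairs: each gets the later ones (no trailing var yet)
def zerosOf : List (Int × Char) → List (List Int)
  | [] => []
  | (w, c) :: rest => if c = '0' then (w :: onesOf rest) :: zerosOf rest else zerosOf rest

-- B-shape clauses of the '0' pairs, threading the accumulated ones o
def bZeros (var : Int) (o : List Int) : List (Int × Char) → List (List Int)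
  | [] => []
  | (w, c) :: rest => if c = '0' then (w :: o ++ [var]) :: bZeros var o rest
                      else bZeros var (w :: o) rest

-- B-shape clauses with the accumulated ones kept in scan order (reversed per clause)
def bZeros2 (var : Int) (o : List Int) : List (Int × Char) → List (List Int)
  | [] => []
  | (w, c) :: rest => if c = '0' then (w :: o.reverse ++ [var]) :: bZeros2 var o rest
                      else bZeros2 var (o ++ [w]) rest

theorem onesOf_append (L M : List (Int × Char)) :
    onesOf (L ++ M) = onesOf L ++ onesOf M := by
  induction L with
  | nil => simp [onesOf]
  | cons p rest ih =>
    obtain ⟨w, c⟩ := p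
    by_cases h : c = '0' <;> simp [onesOf, h, ih]

theorem onesOf_reverse (L : List (Int × Char)) :
    onesOf L.reverse = (onesOf L).reverse := by
  induction L with
  | nil => rfl
  | cons p rest ih =>
    obtain ⟨w, c⟩ := p
    by_cases h : c = '0' <;>
      simp [onesOf, h, List.reverse_cons, onesOf_append, ih]

theorem afold_eq (L : List (Int × Char)) : ∀ cnf : List (List Int),
    L.foldl aStep cnf = cnf.map (fun cl => cl ++ onesOf L) ++ zerosOf L := by
  induction L with
  | nil => intro cnf; simp [onesOf, zerosOf]
  | cons p rest ih =>
    intro cnf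
    obtain ⟨w, c⟩ := p
    by_cases h : c = '0'
    · simp only [List.foldl_cons, aStep, h, ih, onesOf, zerosOf]
      simp
    · simp only [List.foldl_cons, aStep, h, pushVar, ih, onesOf, zerosOf]
      simp [List.map_map, Function.comp]
  
theorem bZeros2_eq (var : Int) (L : List (Int × Char)) : ∀ o : List Int,
    bZeros2 var o L = bZeros var o.reverse L := by
  induction L with
  | nil => intro o; simp [bZeros2, bZeros]
  | cons p rest ih =>
    intro o
    obtain ⟨w, c⟩ := p
    by_cases h : c = '0'
    · simp [bZeros2, bZeros, h, ih]
    · simp [bZeros2, bZeros, h, ih]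

theorem bfold_eq (var : Int) (L : List (Int × Char)) : ∀ (o : List Int) (z : List (List Int)),
    L.foldl (bStep var) (o, z) = (o ++ onesOf L, z ++ bZeros2 var o L) := by
  induction L with
  | nil => intro o z; simp [onesOf, bZeros2]
  | cons p rest ih =>
    intro o z
    obtain ⟨w, c⟩ := p
    by_cases h : c = '0'
    · simp [bStep, h, ih, onesOf, bZeros2]
    · simp [bStep, h, ih, onesOf, bZeros2]

theorem bZeros_append (var : Int) (L M : List (Int × Char)) : ∀ o : List Int,
    bZeros var o (L ++ M) = bZeros var o L ++ bZeros var ((onesOf L).reverse ++ o) M := by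
  induction L with
  | nil => intro o; simp [bZeros, onesOf]
  | cons p rest ih =>
    intro o
    obtain ⟨w, c⟩ := p
    by_cases h : c = '0'
    · simp [bZeros, h, onesOf, ih]
    · simp [bZeros, h, onesOf, ih]

theorem zeros_rel (var : Int) (L : List (Int × Char)) :
    (zerosOf L.reverse).map (fun cl => cl ++ [var]) = (bZeros var [] L).reverse := by
  induction L using List.reverseRecOn with
  | nil => rfl
  | append_singleton L p ih =>
    obtain ⟨w, c⟩ := p
    by_cases h : c = '0'
    · simp [zerosOf, h, bZeros_append, bZeros, onesOf_reverse, ih]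
    · simp [zerosOf, h, bZeros_append, bZeros, ih]

theorem range_reverse_map (n : Nat) :
    (List.range n).reverse = (List.range n).map (fun i => n - 1 - i) := by
  apply List.ext_getElem
  · simp
  · intro i h1 h2
    simp at h1
    simp [List.getElem_reverse]

-- ===== VERDICT (by name: the statement is the Claim_ definition above) =====
theorem getCNF_spec : Claim_equal_getCNF := by
  intro variable_ binStr sign origTotalVars _
  unfold Spec_getCNF getCNF getCNF_alt
  set chars := binStr.toList with hchars
  set n := chars.length with hn
  set s : Int := if sign then 1 else -1 with hs
  -- the ascending (value, char) pair list
  set M : List (Int × Char) := (List.range n).map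
      (fun (j : Nat) => (s * ((j : Int) + 1 + origTotalVars), chars.getD j ' ')) with hM
  have hMrev : M.reverse = (List.range n).map
      (fun (i : Nat) => (s * (((n - 1 - i : Nat) : Int) + 1 + origTotalVars), chars.getD (n - 1 - i) ' ')) := by
    rw [hM, ← List.map_reverse, range_reverse_map, List.map_map]
    rfl
  -- A's fold is the aStep-fold over M.reverse
  have hA : (List.range n).foldl (fun cnfClauses (i : Nat) =>
      let newVar : Int := (n : Int) - (i : Int) + origTotalVars
      let newVar : Int := if sign = false then (-1) * ((n : Int) - (i : Int) + origTotalVars) else newVar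
      if chars.getD (n - i - 1) ' ' = '0' then
        cnfClauses ++ [[newVar]]
      else pushVar newVar cnfClauses) [[(n : Int) + 1 + origTotalVars]]
      = M.reverse.foldl aStep [[(n : Int) + 1 + origTotalVars]] := by
    rw [hMrev, List.foldl_map]
    apply PySem.List.foldl_congr_mem
    intro cnf i hi
    have hi' : i < n := List.mem_range.mp hi
    have hcast : ((n - 1 - i : Nat) : Int) = (n : Int) - (i : Int) - 1 := by
      push_cast [Nat.sub_sub]; omega
    have hval : s * (((n - 1 - i : Nat) : Int) + 1 + origTotalVars)
        = if sign = false then (-1) * ((n : Int) - (i : Int) + origTotalVars)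
          else (n : Int) - (i : Int) + origTotalVars := by
      rw [hcast, hs]; cases sign <;> simp
    have hidx : n - 1 - i = n - i - 1 := by omega
    simp only [aStep]
    rw [hval, hidx]
  -- B's fold is the bStep-fold over M
  have hB : (List.range n).foldl (fun (st : List Int × List (List Int)) (j : Nat) =>
      let v : Int := s * ((j : Int) + 1 + origTotalVars)
      if chars.getD j ' ' = '0' then (st.1, st.2 ++ [v :: st.1.reverse ++ [variable_]])
      else (st.1 ++ [v], st.2)) ([], [])
      = M.foldl (bStep variable_) ([], []) := by
    rw [hM, List.foldl_map]
    rfl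
  simp only []
  rw [hA, afold_eq, hB, bfold_eq variable_ M [] [], bZeros2_eq]
  simp [pushVar, onesOf_reverse, ← zeros_rel]
  exact hn
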